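-- pv_equiv track=rewrite | github.com/dischorde/interview-prep | codility.py | prefix_dna_counts
-- ===== SOURCE A (Python) =====
-- def prefix_dna_counts(dna_string):
--     a = [0] * (len(dna_string) + 1)
--     c = [0] * (len(dna_string) + 1)
--     g = [0] * (len(dna_string) + 1)
--
--     for idx, letter in enumerate(dna_string):
--         idx += 1
--         a[idx] = a[idx - 1]
--         c[idx] = c[idx - 1]
--         g[idx] = g[idx - 1]
--         if letter == "A": a[idx] += 1
--         elif letter == "C": c[idx] += 1
--         elif letter == "G": g[idx] += 1
--
--     return [a, c, g]
-- ===== SOURCE B (Python) =====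
-- def _prefix_counts(dna_string, letter):
--     out = [0]
--     for ch in dna_string:
--         out.append(out[-1] + (1 if ch == letter else 0))
--     return out
--
--
-- def prefix_dna_counts(dna_string):
--     # three independent single-letter scans instead of one fused triple-array pass
--     return [_prefix_counts(dna_string, letter) for letter in "ACG"]
-- ===== Notes on version B (the rewrite author's own statement) =====
-- stated objective: idiomatic
-- what changed: Replaced the fused loop that index-assigns into three preallocated arrays by three independent per-letter prefix scans that append to a growing list, one pass per target letter.
import Mathlib
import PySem

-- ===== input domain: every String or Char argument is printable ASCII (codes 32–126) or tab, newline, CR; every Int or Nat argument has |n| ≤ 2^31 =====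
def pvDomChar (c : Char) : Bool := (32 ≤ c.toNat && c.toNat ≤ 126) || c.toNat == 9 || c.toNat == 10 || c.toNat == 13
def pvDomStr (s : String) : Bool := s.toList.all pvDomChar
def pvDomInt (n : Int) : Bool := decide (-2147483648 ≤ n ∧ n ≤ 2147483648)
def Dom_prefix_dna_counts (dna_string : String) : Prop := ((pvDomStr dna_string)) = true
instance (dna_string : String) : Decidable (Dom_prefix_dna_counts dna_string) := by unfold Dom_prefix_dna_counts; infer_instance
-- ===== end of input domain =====

-- B replaces A's fused triple-array index-assignment loop by three independent
-- per-letter prefix scans that append to a growing list (objective: idiomatic).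

-- ===== PORT A =====
-- one loop step of A: shift all three arrays at index idx, then the elif chain
-- (list assignment a[idx] = v is ported as List.set idx.toNat v: idx ≥ 1 and
-- in range here, so Nat indexing is exact)
def pvStepA (st : List Int × List Int × List Int) (p : Int × Char) :
    List Int × List Int × List Int :=
  let idx : Int := p.1 + 1
  let i : Nat := idx.toNat
  let a := st.1.set i (PySem.List.pyGetD st.1 (idx - 1) 0)
  let c := st.2.1.set i (PySem.List.pyGetD st.2.1 (idx - 1) 0)
  let g := st.2.2.set i (PySem.List.pyGetD st.2.2 (idx - 1) 0)
  if p.2 == 'A' then (a.set i (PySem.List.pyGetD a idx 0 + 1), c, g)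
  else if p.2 == 'C' then (a, c.set i (PySem.List.pyGetD c idx 0 + 1), g)
  else if p.2 == 'G' then (a, c, g.set i (PySem.List.pyGetD g idx 0 + 1))
  else (a, c, g)

def prefix_dna_counts (dna_string : String) : List (List Int) :=
  let n := dna_string.toList.length
  let a : List Int := List.replicate (n + 1) 0
  let c : List Int := List.replicate (n + 1) 0
  let g : List Int := List.replicate (n + 1) 0
  let res := (PySem.List.enumerate dna_string.toList 0).foldl pvStepA (a, c, g)
  [res.1, res.2.1, res.2.2]

-- ===== PORT B =====
-- out[-1] is ported as pyGetD out (-1) 0 (out is never empty, so this is exact)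
def pvPrefixCounts (dna_string : String) (letter : Char) : List Int :=
  dna_string.toList.foldl
    (fun out ch => out ++ [PySem.List.pyGetD out (-1) 0 + (if ch == letter then 1 else 0)])
    [0]

def prefix_dna_counts_alt (dna_string : String) : List (List Int) :=
  ("ACG".toList).map (fun letter => pvPrefixCounts dna_string letter)

-- ===== PRECONDITION & SPEC =====
def Spec_prefix_dna_counts (dna_string : String) (out : List (List Int)) : Prop := out = prefix_dna_counts_alt dna_string
instance (dna_string : String) (out : List (List Int)) : Decidable (Spec_prefix_dna_counts dna_string out) := by unfold Spec_prefix_dna_counts; infer_instance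

-- ===== CLAIM (what is proved, stated in full; the proofs are below) =====
def Claim_equal_prefix_dna_counts : Prop := ∀ (dna_string : String), Dom_prefix_dna_counts dna_string → Spec_prefix_dna_counts dna_string (prefix_dna_counts dna_string)

-- ===== LEMMAS AND PROOFS =====

-- single-array version of one loop step of A, specialised to one target letter
def pvStep1 (t : Char) (x : List Int) (p : Int × Char) : List Int :=
  let idx : Int := p.1 + 1
  let i : Nat := idx.toNat
  let x' := x.set i (PySem.List.pyGetD x (idx - 1) 0)
  if p.2 == t then x'.set i (PySem.List.pyGetD x' idx 0 + 1) else x'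

-- A's fused step is the three independent single-letter steps
theorem pvStepA_eq (st : List Int × List Int × List Int) (p : Int × Char) :
    pvStepA st p = (pvStep1 'A' st.1 p, pvStep1 'C' st.2.1 p, pvStep1 'G' st.2.2 p) := by
  simp only [pvStepA, pvStep1]
  by_cases hA : p.2 = 'A' <;> by_cases hC : p.2 = 'C' <;> by_cases hG : p.2 = 'G' <;>
    simp_all

theorem pvFoldl_triple {α β γ δ : Type} (f : β → α → β) (g : γ → α → γ) (h : δ → α → δ)
    (l : List α) (a : β) (b : γ) (c : δ) :
    l.foldl (fun st p => (f st.1 p, g st.2.1 p, h st.2.2 p)) (a, b, c)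
      = (l.foldl f a, l.foldl g b, l.foldl h c) := by
  induction l generalizing a b c with
  | nil => rfl
  | cons x xs ih => simp [List.foldl_cons, ih]

theorem pvGetD_last (acc : List Int) (s : Nat) (h : acc.length = s + 1) :
    acc.getD s 0 = PySem.List.pyGetD acc (-1) 0 := by
  have hne : acc ≠ [] := by intro he; simp [he] at h
  rw [PySem.List.pyGetD_neg_one _ _ hne, List.getLast_eq_getElem,
    List.getD_eq_getElem _ _ (by omega)]
  congr 1
  omega

-- loop invariant: after consuming cs from index s with already-built prefix acc,
-- A's array-update fold equals B's appending scan
theorem pvInv (t : Char) (cs : List Char) (s : Nat) (acc : List Int)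
    (h : acc.length = s + 1) :
    (PySem.List.enumerate cs (s : Int)).foldl (pvStep1 t)
        (acc ++ List.replicate cs.length 0)
      = cs.foldl
          (fun out ch => out ++ [PySem.List.pyGetD out (-1) 0 + (if ch == t then 1 else 0)])
          acc := by
  induction cs generalizing s acc with
  | nil => simp [PySem.List.enumerate_nil]
  | cons ch rest ih =>
    rw [PySem.List.enumerate_cons, List.foldl_cons, List.foldl_cons]
    have hstep : pvStep1 t (acc ++ List.replicate (rest.length + 1) 0) ((s : Int), ch)
        = (acc ++ [PySem.List.pyGetD acc (-1) 0 + (if ch == t then 1 else 0)])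
            ++ List.replicate rest.length 0 := by
      simp only [pvStep1]
      have hi : ((s : Int) + 1).toNat = s + 1 := by omega
      have hget : PySem.List.pyGetD (acc ++ List.replicate (rest.length + 1) (0:Int))
          ((s : Int) + 1 - 1) 0 = PySem.List.pyGetD acc (-1) 0 := by
        have : (s : Int) + 1 - 1 = ((s : Nat) : Int) := by omega
        rw [this, PySem.List.pyGetD_natCast, List.getD_append _ _ _ _ (by omega),
          pvGetD_last acc s h]
      have hset : ∀ (v : Int),
          (acc ++ List.replicate (rest.length + 1) (0:Int)).set (s + 1) v
            = acc ++ v :: List.replicate rest.length 0 := by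
        intro v
        rw [List.replicate_succ, List.set_append_right _ _ (by omega), h]
        simp
      rw [hi, hget, hset]
      by_cases hc : ch = t
      · have hget2 : PySem.List.pyGetD
            (acc ++ PySem.List.pyGetD acc (-1) 0 :: List.replicate rest.length (0:Int))
            ((s : Int) + 1) 0 = PySem.List.pyGetD acc (-1) 0 := by
          have h2 : (s : Int) + 1 = ((s + 1 : Nat) : Int) := by omega
          rw [h2, PySem.List.pyGetD_natCast, List.getD_eq_getElem?_getD, ← h,
            List.getElem?_append_right (Nat.le_refl _), Nat.sub_self]
          simp
        have hset2 : ∀ (v w : Int),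
            (acc ++ v :: List.replicate rest.length (0:Int)).set (s + 1) w
              = acc ++ w :: List.replicate rest.length 0 := by
          intro v w
          rw [List.set_append_right _ _ (by omega), h]
          simp
        simp only [hc, beq_self_eq_true, if_true, hget2, hset2]
        rw [List.append_assoc]
        rfl
      · have hcb : (ch == t) = false := by simp [hc]
        simp [hcb]
    rw [List.length_cons, hstep]
    have h2 : (((s : Int)) + 1) = ((s + 1 : Nat) : Int) := by omega
    rw [h2, ih (s + 1) _ (by simp [h])]

theorem pvComponent (t : Char) (cs : List Char) :
    (PySem.List.enumerate cs 0).foldl (pvStep1 t) (List.replicate (cs.length + 1) 0)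
      = cs.foldl
          (fun out ch => out ++ [PySem.List.pyGetD out (-1) 0 + (if ch == t then 1 else 0)])
          [0] := by
  have h0 : List.replicate (cs.length + 1) (0:Int)
      = [0] ++ List.replicate cs.length 0 := by simp [List.replicate_succ]
  rw [h0]
  exact pvInv t cs 0 [0] rfl

-- ===== VERDICT (by name: the statement is the Claim_ definition above) =====
theorem prefix_dna_counts_spec : Claim_equal_prefix_dna_counts := by
  intro s _
  show prefix_dna_counts s = prefix_dna_counts_alt s
  have hACG : "ACG".toList = ['A', 'C', 'G'] := rfl
  simp only [prefix_dna_counts, prefix_dna_counts_alt, hACG, List.map_cons, List.map_nil,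
    pvPrefixCounts]
  have hfun : pvStepA = fun st p =>
      (pvStep1 'A' st.1 p, pvStep1 'C' st.2.1 p, pvStep1 'G' st.2.2 p) := by
    funext st p; exact pvStepA_eq st p
  rw [hfun, pvFoldl_triple]
  rw [pvComponent 'A' s.toList, pvComponent 'C' s.toList, pvComponent 'G' s.toList]
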